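-- pv_equiv track=rewrite | github.com/jet-c-21/Seshat | ult/outline_tool.py | has_outline
-- ===== SOURCE A (Python) =====
-- def has_outline(target: str, sentence: str) -> list:
--     target_token = target.replace(' ', '')
--     if target_token not in sentence.replace(' ', ''):
--         return []
--
--     last = len(sentence)
--     for start in range(last):
--         end = start + 1
--         while end <= last:
--             curr_token = sentence[start:end].replace(' ', '')
--             if curr_token == target_token:
--                 return [start, end]
--
--             end += 1
--
--     return []
-- ===== SOURCE B (Python) =====
-- def has_outline(target: str, sentence: str) -> list:
--     t = target.replace(' ', '')
--     n = len(sentence)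
--     for start in range(n):
--         i = 0  # number of chars of t matched so far from this start
--         for end in range(start, n):
--             c = sentence[end]
--             if c != ' ':
--                 if i < len(t) and c == t[i]:
--                     i += 1
--                 else:
--                     break  # a mismatched char stays in every longer window
--             if i == len(t):
--                 return [start, end + 1]
--     return []
-- ===== Notes on version B (the rewrite author's own statement) =====
-- stated objective: faster
-- what changed: Replaces A's re-strip-and-compare of every growing slice (and its separate whole-string containment precheck) with a per-start incremental scan that matches target characters one at a time while skipping spaces and breaks on the first mismatch, dropping the O(n) work per window.
import Mathlib
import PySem

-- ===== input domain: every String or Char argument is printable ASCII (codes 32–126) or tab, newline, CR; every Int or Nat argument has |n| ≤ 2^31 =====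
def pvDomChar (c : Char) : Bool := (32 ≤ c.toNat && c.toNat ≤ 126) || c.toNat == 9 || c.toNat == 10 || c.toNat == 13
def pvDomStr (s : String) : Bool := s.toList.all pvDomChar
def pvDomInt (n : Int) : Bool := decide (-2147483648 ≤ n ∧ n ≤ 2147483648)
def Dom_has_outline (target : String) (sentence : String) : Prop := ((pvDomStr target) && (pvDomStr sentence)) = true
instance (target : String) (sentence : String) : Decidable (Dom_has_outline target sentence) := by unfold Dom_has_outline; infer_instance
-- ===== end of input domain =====

-- B replaces A's re-strip-and-compare of every growing slice (plus a whole-string containment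
-- precheck) by a per-start incremental match of target characters skipping spaces; same return value.

-- ===== PORT A =====
-- inner `while end <= last` loop of A (returns the found [start, end] pair, if any)
def hasOutlineWhileA (tt : List Char) (s : List Char) (last start : Nat) (e : Nat) : Option (Nat × Nat) :=
  if _h : e ≤ last then
    if PySem.Chars.replace (PySem.List.slice s (some (start : Int)) (some (e : Int))) [' '] [] = tt then
      some (start, e)
    else
      hasOutlineWhileA tt s last start (e + 1)
  else none
termination_by last + 1 - e
decreasing_by omega

-- outer `for start in range(last)` loop of A
def hasOutlineForA (tt : List Char) (s : List Char) (last : Nat) (start : Nat) : Option (Nat × Nat) :=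
  if _h : start < last then
    match hasOutlineWhileA tt s last start (start + 1) with
    | some r => some r
    | none => hasOutlineForA tt s last (start + 1)
  else none
termination_by last - start
decreasing_by omega

def has_outline (target : String) (sentence : String) : List Int :=
  let target_token := PySem.Chars.replace target.toList [' '] []
  if PySem.Chars.isIn target_token (PySem.Chars.replace sentence.toList [' '] []) = false then []
  else
    let last := sentence.toList.length
    match hasOutlineForA target_token sentence.toList last 0 with
    | some (st, en) => [(st : Int), (en : Int)]
    | none => []

-- ===== PORT B =====
-- B's inner `for end in range(start, n)` loop: `i` chars of `t` matched so far, scanning `rem`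
def hasOutlineInnerB (t : List Char) (start : Nat) : List Char → Nat → Nat → Option (Nat × Nat)
  | [], _, _ => none
  | c :: rest, e, i =>
    if c ≠ ' ' then
      if i < t.length ∧ t[i]? = some c then
        if i + 1 = t.length then some (start, e + 1)
        else hasOutlineInnerB t start rest (e + 1) (i + 1)
      else none
    else
      if i = t.length then some (start, e + 1)
      else hasOutlineInnerB t start rest (e + 1) i

-- B's outer `for start in range(n)` loop
def hasOutlineForB (t : List Char) (s : List Char) (start : Nat) : Option (Nat × Nat) :=
  if _h : start < s.length then
    match hasOutlineInnerB t start (s.drop start) start 0 with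
    | some r => some r
    | none => hasOutlineForB t s (start + 1)
  else none
termination_by s.length - start
decreasing_by omega

def has_outline_alt (target : String) (sentence : String) : List Int :=
  let t := PySem.Chars.replace target.toList [' '] []
  match hasOutlineForB t sentence.toList 0 with
  | some (st, en) => [(st : Int), (en : Int)]
  | none => []

-- ===== PRECONDITION & SPEC =====
def Spec_has_outline (target : String) (sentence : String) (out : List Int) : Prop := out = has_outline_alt target sentence
instance (target : String) (sentence : String) (out : List Int) : Decidable (Spec_has_outline target sentence out) := by unfold Spec_has_outline; infer_instance

-- ===== CLAIM (what is proved, stated in full; the proofs are below) =====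
def Claim_equal_has_outline : Prop := ∀ (target : String) (sentence : String), Dom_has_outline target sentence → Spec_has_outline target sentence (has_outline target sentence)

-- ===== LEMMAS AND PROOFS =====

-- `.replace(' ', '')` is exactly `filter (· ≠ ' ')`
theorem replace_space_go (fuel : Nat) : ∀ (l acc : List Char), l.length ≤ fuel →
    PySem.Chars.replace.go [' '] [] fuel l acc = acc.reverse ++ l.filter (· ≠ ' ') := by
  induction fuel with
  | zero => intro l acc h; simp at h; simp [h, PySem.Chars.replace.go]
  | succ n ih =>
    intro l acc h
    cases l with
    | nil => simp [PySem.Chars.replace.go]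
    | cons c rest =>
      by_cases hc : c = ' '
      · subst hc
        rw [PySem.Chars.replace.go]
        simp [List.isPrefixOf]
        rw [ih rest acc (by simpa using h)]
        simp
      · rw [PySem.Chars.replace.go]
        have hnp : ¬ [' '].isPrefixOf (c :: rest) = true := by
          simp [List.isPrefixOf]; intro hh; exact hc hh.symm
        simp only [hnp]
        rw [ih rest (c :: acc) (by simpa using h)]
        simp [hc]

theorem replace_space_eq_filter (l : List Char) :
    PySem.Chars.replace l [' '] [] = l.filter (· ≠ ' ') := by
  rw [PySem.Chars.replace]
  simp [replace_space_go l.length l [] le_rfl]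

-- the space-stripped window sentence[start:e]
def stripWin (s : List Char) (start e : Nat) : List Char :=
  ((s.drop start).take (e - start)).filter (· ≠ ' ')

theorem filter_take_eq_stripWin (s : List Char) (start e : Nat) :
    List.filter (fun x => decide (x ≠ ' ')) (List.take (e - start) (List.drop start s)) = stripWin s start e := rfl

theorem stripWin_succ (s : List Char) (start e : Nat) (c : Char) (rest : List Char)
    (hse : start ≤ e) (hdrop : s.drop e = c :: rest) :
    stripWin s start (e + 1) = stripWin s start e ++ (if c ≠ ' ' then [c] else []) := by
  have hc : s[e]? = some c := by
    have h0 : (s.drop e)[0]? = some c := by rw [hdrop]; rfl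
    simpa [List.getElem?_drop] using h0
  have hk : (s.drop start)[e - start]? = some c := by
    rw [List.getElem?_drop, Nat.add_sub_cancel' hse]; exact hc
  unfold stripWin
  have h1 : e + 1 - start = (e - start) + 1 := by omega
  rw [h1, List.take_succ, hk, List.filter_append]
  by_cases h : c = ' ' <;> simp [h]

theorem stripWin_mono (s : List Char) (start e e' : Nat) (h : e ≤ e') :
    stripWin s start e <+: stripWin s start e' :=
  List.IsPrefix.filter _ (List.take_prefix_take_left (by omega))

-- A's inner loop returns none when no window from `lo` on strips to tt
theorem whileA_none (tt s : List Char) (start : Nat) :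
    ∀ (k lo : Nat), s.length + 1 - lo ≤ k →
    (∀ e', lo ≤ e' → e' ≤ s.length → stripWin s start e' ≠ tt) →
    hasOutlineWhileA tt s s.length start lo = none := by
  intro k
  induction k with
  | zero =>
    intro lo hk _
    rw [hasOutlineWhileA]
    simp only [dif_neg (by omega : ¬ lo ≤ s.length)]
  | succ n ih =>
    intro lo hk hno
    rw [hasOutlineWhileA]
    by_cases hlo : lo ≤ s.length
    · rw [dif_pos hlo, PySem.List.slice_natCast, replace_space_eq_filter,
          filter_take_eq_stripWin, if_neg (hno lo le_rfl hlo)]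
      exact ih (lo + 1) (by omega) (fun e' h1 h2 => hno e' (by omega) h2)
    · rw [dif_neg hlo]

-- A's inner loop only returns a window that strips to tt
theorem whileA_some (tt s : List Char) (start : Nat) :
    ∀ (k lo st en : Nat), s.length + 1 - lo ≤ k →
    hasOutlineWhileA tt s s.length start lo = some (st, en) →
    st = start ∧ stripWin s start en = tt := by
  intro k
  induction k with
  | zero =>
    intro lo st en hk h
    rw [hasOutlineWhileA, dif_neg (by omega : ¬ lo ≤ s.length)] at h
    exact absurd h (by simp)
  | succ n ih =>
    intro lo st en hk h
    rw [hasOutlineWhileA] at h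
    by_cases hlo : lo ≤ s.length
    · rw [dif_pos hlo, PySem.List.slice_natCast, replace_space_eq_filter,
          filter_take_eq_stripWin] at h
      by_cases heq : stripWin s start lo = tt
      · rw [if_pos heq] at h
        cases h
        exact ⟨rfl, heq⟩
      · rw [if_neg heq] at h
        exact ih (lo + 1) st en (by omega) h
    · rw [dif_neg hlo] at h
      exact absurd h (by simp)

-- a (strict) extension of tt.take i that is not a prefix of tt never strips-equals tt later on
theorem not_prefix_of_mismatch (tt : List Char) (i : Nat) (c : Char)
    (hm : ¬ (i < tt.length ∧ tt[i]? = some c)) : ¬ (tt.take i ++ [c]) <+: tt := by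
  intro hp
  by_cases hil : i < tt.length
  · apply hm
    refine ⟨hil, ?_⟩
    have hlen : (tt.take i ++ [c]).length = i + 1 := by
      simp [List.length_take, Nat.min_eq_left hil.le]
    have heq := List.prefix_iff_eq_take.mp hp
    rw [hlen, List.take_succ] at heq
    have hgi := List.getElem?_eq_getElem hil
    rw [hgi] at heq
    have h2 := List.append_cancel_left heq
    simp at h2
    rw [hgi, h2]
  · have := hp.length_le
    simp at this
    omega

-- the core per-start equivalence of the two inner loops
theorem inner_eq (tt s : List Char) (start : Nat) :
    ∀ (rem : List Char) (e i : Nat), s.drop e = rem → start ≤ e →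
    stripWin s start e = tt.take i → i ≤ tt.length →
    hasOutlineWhileA tt s s.length start (e + 1) = hasOutlineInnerB tt start rem e i := by
  intro rem
  induction rem with
  | nil =>
    intro e i hdrop hse hwin hi
    have he : s.length ≤ e := by
      by_contra hlt
      have := List.drop_eq_nil_iff.mp hdrop
      omega
    rw [hasOutlineWhileA, dif_neg (by omega : ¬ e + 1 ≤ s.length)]
    rfl
  | cons c rest ih =>
    intro e i hdrop hse hwin hi
    have he : e < s.length := by
      by_contra hlt
      rw [List.drop_eq_nil_iff.mpr (by omega)] at hdrop
      exact absurd hdrop (by simp)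
    have hdrop' : s.drop (e + 1) = rest := by
      have h1 := congrArg (List.drop 1) hdrop
      simpa [List.drop_drop, Nat.add_comm] using h1
    have hwin' := stripWin_succ s start e c rest hse hdrop
    have hA : hasOutlineWhileA tt s s.length start (e + 1) =
        (if stripWin s start (e + 1) = tt then some (start, e + 1)
         else hasOutlineWhileA tt s s.length start (e + 1 + 1)) := by
      rw [hasOutlineWhileA, dif_pos (by omega : e + 1 ≤ s.length),
          PySem.List.slice_natCast, replace_space_eq_filter, filter_take_eq_stripWin]
    rw [hA]
    by_cases hc : c = ' '
    · -- a space leaves the stripped window unchanged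
      have hstep : stripWin s start (e + 1) = tt.take i := by
        rw [hwin', hwin]; simp [hc]
      by_cases hil : i = tt.length
      · rw [if_pos (by rw [hstep, hil, List.take_length])]
        subst hc
        rw [hasOutlineInnerB, if_neg (by simp), if_pos hil]
      · rw [if_neg (by
          rw [hstep]
          intro hcon
          have := congrArg List.length hcon
          simp at this
          omega)]
        have hBeq : hasOutlineInnerB tt start (c :: rest) e i = hasOutlineInnerB tt start rest (e + 1) i := by
          subst hc
          rw [hasOutlineInnerB, if_neg (by simp), if_neg hil]
        rw [hBeq]
        exact ih (e + 1) i hdrop' (by omega) hstep hi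
    · have hstep : stripWin s start (e + 1) = tt.take i ++ [c] := by
        rw [hwin', hwin]; simp [hc]
      by_cases hm : i < tt.length ∧ tt[i]? = some c
      · obtain ⟨hil, hti⟩ := hm
        have htake : tt.take i ++ [c] = tt.take (i + 1) := by
          rw [List.take_succ, hti]; rfl
        by_cases hfin : i + 1 = tt.length
        · rw [if_pos (by rw [hstep, htake, hfin, List.take_length])]
          rw [hasOutlineInnerB, if_pos (by simpa using hc), if_pos ⟨hil, hti⟩, if_pos hfin]
        · rw [if_neg (by
            rw [hstep, htake]
            intro hcon
            have := congrArg List.length hcon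
            simp at this
            omega)]
          have hBeq : hasOutlineInnerB tt start (c :: rest) e i = hasOutlineInnerB tt start rest (e + 1) (i + 1) := by
            rw [hasOutlineInnerB, if_pos (by simpa using hc), if_pos ⟨hil, hti⟩, if_neg hfin]
          rw [hBeq]
          exact ih (e + 1) (i + 1) hdrop' (by omega) (by rw [hstep, htake]) (by omega)
      · -- mismatch: every longer window keeps the wrong stripped prefix, so A finds nothing either
        have hnp := not_prefix_of_mismatch tt i c hm
        have hBeq : hasOutlineInnerB tt start (c :: rest) e i = none := by
          rw [hasOutlineInnerB, if_pos (by simpa using hc), if_neg hm]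
        rw [hBeq]
        rw [if_neg (fun hcon => hnp (by rw [← hstep, hcon]))]
        apply whileA_none tt s start (s.length + 1 - (e + 1 + 1)) (e + 1 + 1) le_rfl
        intro e' h1 _ hcon
        have hpre : (tt.take i ++ [c]) <+: stripWin s start e' := by
          rw [← hstep]
          exact stripWin_mono s start (e + 1) e' (by omega)
        rw [hcon] at hpre
        exact hnp hpre

-- the two outer loops agree at every start
theorem for_eq (tt s : List Char) :
    ∀ (k start : Nat), s.length - start ≤ k →
    hasOutlineForA tt s s.length start = hasOutlineForB tt s start := by
  intro k
  induction k with
  | zero =>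
    intro start hk
    rw [hasOutlineForA, hasOutlineForB,
        dif_neg (by omega : ¬ start < s.length), dif_neg (by omega : ¬ start < s.length)]
  | succ n ih =>
    intro start hk
    rw [hasOutlineForA, hasOutlineForB]
    by_cases hlt : start < s.length
    · rw [dif_pos hlt, dif_pos hlt]
      rw [← inner_eq tt s start (s.drop start) start 0 rfl le_rfl (by simp [stripWin]) (by omega)]
      cases hasOutlineWhileA tt s s.length start (start + 1) with
      | some r => rfl
      | none => exact ih (start + 1) (by omega)
    · rw [dif_neg hlt, dif_neg hlt]

-- if A's outer loop finds a window, its stripped content tt occurs in the stripped sentence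
theorem forA_some_infix (tt s : List Char) :
    ∀ (k start st en : Nat), s.length - start ≤ k →
    hasOutlineForA tt s s.length start = some (st, en) →
    tt <:+: s.filter (· ≠ ' ') := by
  intro k
  induction k with
  | zero =>
    intro start st en hk h
    rw [hasOutlineForA, dif_neg (by omega : ¬ start < s.length)] at h
    exact absurd h (by simp)
  | succ n ih =>
    intro start st en hk h
    rw [hasOutlineForA] at h
    by_cases hlt : start < s.length
    · rw [dif_pos hlt] at h
      cases hw : hasOutlineWhileA tt s s.length start (start + 1) with
      | some r =>
        rw [hw] at h
        cases h
        obtain ⟨_, hwin⟩ := whileA_some tt s start (s.length + 1 - (start + 1)) (start + 1) st en le_rfl (by rw [hw])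
        rw [← hwin]
        apply List.IsInfix.filter
        exact ((List.take_prefix _ _).isInfix).trans ((List.drop_suffix _ _).isInfix)
      | none =>
        rw [hw] at h
        exact ih (start + 1) st en (by omega) h
    · rw [dif_neg hlt] at h
      exact absurd h (by simp)

-- ===== VERDICT (by name: the statement is the Claim_ definition above) =====
theorem has_outline_spec : Claim_equal_has_outline := by
  intro target sentence _
  unfold Spec_has_outline has_outline has_outline_alt
  set tt := PySem.Chars.replace target.toList [' '] [] with htt
  set s := sentence.toList with hs
  by_cases hin : PySem.Chars.isIn tt (PySem.Chars.replace s [' '] []) = false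
  · rw [if_pos hin]
    cases hB : hasOutlineForB tt s 0 with
    | none => simp only [hB]
    | some r =>
      exfalso
      obtain ⟨st, en⟩ := r
      have hA : hasOutlineForA tt s s.length 0 = some (st, en) := by
        rw [for_eq tt s s.length 0 (by omega)]; exact hB
      have hinf := forA_some_infix tt s s.length 0 st en (by omega) hA
      rw [replace_space_eq_filter] at hin
      rw [PySem.Chars.isIn_eq_false_iff] at hin
      exact hin hinf
  · rw [if_neg hin]
    simp only [for_eq tt s s.length 0 (by omega)]
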